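-- pv_equiv track=rewrite | github.com/DSGAMING98/dishcovery | app/crud.py | ingredients_missing
-- ===== SOURCE A (Python) =====
-- from typing import List, Iterable, Dict, Any
--
-- def _norm(s: str) -> str:
--     return s.lower().strip()
--
-- def ingredients_missing(recipe: Dict[str, Any], pantry: Iterable[str]) -> List[str]:
--     """Loose matching: if any pantry item is a substring of an ingredient, it's considered covered."""
--     pset = {_norm(x) for x in pantry}
--     missing = []
--     for ing in recipe.get("ingredients", []):
--         ing_norm = _norm(ing)
--         if not any(p in ing_norm for p in pset):
--             missing.append(ing)
--     return missing
-- ===== SOURCE B (Python) =====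
-- def ingredients_missing(recipe, pantry):
--     """Loop inversion: sweep pantry items over a parallel coverage mask, then
--     collect the uncovered ingredients in one final pass."""
--     ings = recipe.get("ingredients", [])
--     norms = [i.lower().strip() for i in ings]
--     covered = [False] * len(ings)
--     for x in pantry:
--         p = x.lower().strip()
--         covered = [c or p in n for c, n in zip(covered, norms)]
--     return [ing for ing, c in zip(ings, covered) if not c]
-- ===== Notes on version B (the rewrite author's own statement) =====
-- stated objective: alternative
-- what changed: Inverts the loop nesting: instead of testing every (deduplicated) pantry item inside a per-ingredient any(), B sweeps each pantry item once over a boolean coverage mask kept in parallel with the pre-normalized ingredient list, then collects the uncovered ingredients in a single final pass.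
import Mathlib
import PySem

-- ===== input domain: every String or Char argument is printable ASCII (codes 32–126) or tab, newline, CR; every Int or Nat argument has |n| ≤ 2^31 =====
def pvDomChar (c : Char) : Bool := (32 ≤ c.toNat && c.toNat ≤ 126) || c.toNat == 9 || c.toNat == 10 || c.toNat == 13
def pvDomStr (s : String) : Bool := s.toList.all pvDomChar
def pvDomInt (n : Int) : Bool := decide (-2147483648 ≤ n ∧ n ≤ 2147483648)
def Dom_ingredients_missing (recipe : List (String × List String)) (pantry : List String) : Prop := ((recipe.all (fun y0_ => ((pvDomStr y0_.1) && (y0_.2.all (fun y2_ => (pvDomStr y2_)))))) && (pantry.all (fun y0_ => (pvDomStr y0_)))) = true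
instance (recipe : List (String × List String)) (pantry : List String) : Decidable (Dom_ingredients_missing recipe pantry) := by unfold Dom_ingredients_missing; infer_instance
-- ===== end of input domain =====

-- B inverts the loop nesting (pantry-outer sweep over a coverage mask instead of a
-- per-ingredient any() over a pantry set); objective: alternative, same cost.

-- ===== PORT A =====
-- _norm(s) = s.lower().strip()
def pvNorm (s : String) : String := PySem.Str.strip (PySem.Str.lower s)

def ingredients_missing (recipe : List (String × List String)) (pantry : List String) : List String :=
  let pset := PySem.Set.ofList (pantry.map (fun x => pvNorm x))
  ((PySem.Dict.mk recipe).getD "ingredients" []).foldl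
    (fun missing ing =>
      let ingNorm := pvNorm ing
      if !(pset.any (fun p => PySem.Str.isIn p ingNorm)) then missing ++ [ing] else missing)
    []

-- ===== PORT B =====
def ingredients_missing_alt (recipe : List (String × List String)) (pantry : List String) : List String :=
  let ings := (PySem.Dict.mk recipe).getD "ingredients" []
  let norms := ings.map (fun i => PySem.Str.strip (PySem.Str.lower i))
  let covered := pantry.foldl
    (fun cov x =>
      let p := PySem.Str.strip (PySem.Str.lower x)
      (cov.zip norms).map (fun cn => cn.1 || PySem.Str.isIn p cn.2))
    (List.replicate ings.length false)
  ((ings.zip covered).filter (fun ic => !ic.2)).map (fun ic => ic.1)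

-- ===== PRECONDITION & SPEC =====
def Spec_ingredients_missing (recipe : List (String × List String)) (pantry : List String) (out : List String) : Prop := out = ingredients_missing_alt recipe pantry
instance (recipe : List (String × List String)) (pantry : List String) (out : List String) : Decidable (Spec_ingredients_missing recipe pantry out) := by unfold Spec_ingredients_missing; infer_instance

-- ===== CLAIM (what is proved, stated in full; the proofs are below) =====
def Claim_equal_ingredients_missing : Prop := ∀ (recipe : List (String × List String)) (pantry : List String), Dom_ingredients_missing recipe pantry → Spec_ingredients_missing recipe pantry (ingredients_missing recipe pantry)

-- ===== LEMMAS AND PROOFS =====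

-- iterating `any` over the deduplicated set is the same test as over the original list
theorem pv_any_ofList (xs : List String) (q : String → Bool) :
    (PySem.Set.ofList xs).any q = xs.any q := by
  rcases h : xs.any q with _ | _
  · simp only [List.any_eq_false] at h ⊢
    intro x hx
    exact h x ((PySem.Set.mem_ofList xs x).1 hx)
  · simp only [List.any_eq_true] at h ⊢
    obtain ⟨x, hx, hq⟩ := h
    exact ⟨x, (PySem.Set.mem_ofList xs x).2 hx, hq⟩

-- zipping a map of a list with the list itself pairs each element with its image
theorem pv_zip_map_self {a b : Type} (g : a -> b) (l : List a) :
    (l.map g).zip l = l.map (fun n => (g n, n)) := by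
  induction l with
  | nil => rfl
  | cons x t ih => simp [ih]

theorem pv_zip_self_map {a b : Type} (g : a -> b) (l : List a) :
    l.zip (l.map g) = l.map (fun n => (n, g n)) := by
  induction l with
  | nil => rfl
  | cons x t ih => simp [ih]

-- B's pantry sweep: the mask stays a map over `norms`, accumulating the disjunction
theorem pv_mask_fold (pantry norms : List String) (g : String -> Bool) :
    pantry.foldl
      (fun cov x =>
        let p := PySem.Str.strip (PySem.Str.lower x)
        (cov.zip norms).map (fun cn => cn.1 || PySem.Str.isIn p cn.2))
      (norms.map g)
    = norms.map (fun n =>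
        g n || pantry.any (fun x => PySem.Str.isIn (PySem.Str.strip (PySem.Str.lower x)) n)) := by
  induction pantry generalizing g with
  | nil => simp
  | cons x rest ih =>
    simp only [List.foldl_cons, pv_zip_map_self, List.map_map]
    rw [show ((fun cn : Bool × String =>
          cn.1 || PySem.Str.isIn (PySem.Str.strip (PySem.Str.lower x)) cn.2) ∘
          fun n => (g n, n))
        = fun n => g n || PySem.Str.isIn (PySem.Str.strip (PySem.Str.lower x)) n from rfl]
    rw [ih]
    simp only [List.any_cons, Bool.or_assoc]

theorem ingredients_missing_eq_alt (recipe : List (String × List String)) (pantry : List String) :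
    ingredients_missing recipe pantry = ingredients_missing_alt recipe pantry := by
  unfold ingredients_missing ingredients_missing_alt
  set ings := (PySem.Dict.mk recipe).getD "ingredients" [] with hings
  simp only []
  -- A side: the append-loop is a filter, the set `any` is a list `any`
  rw [PySem.List.foldl_append_if_eq_filter
      (fun ing => !((PySem.Set.ofList (pantry.map (fun x => pvNorm x))).any
        (fun p => PySem.Str.isIn p (pvNorm ing)))) ings []]
  -- B side: rewrite the initial mask as a map over norms, run the sweep lemma, collapse the zip
  have hrep : List.replicate ings.length false
      = (ings.map (fun i => PySem.Str.strip (PySem.Str.lower i))).map (fun _ => false) := by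
    rw [List.map_const', List.length_map]
  rw [hrep, pv_mask_fold]
  simp only [List.map_map, List.nil_append, Bool.false_or]
  rw [pv_zip_self_map, List.filter_map, List.map_map]
  simp only [Function.comp_def, List.map_id']
  congr 1
  funext ing
  rw [pv_any_ofList, List.any_map]
  simp [pvNorm, Function.comp_def]

-- ===== VERDICT (by name: the statement is the Claim_ definition above) =====
theorem ingredients_missing_spec : Claim_equal_ingredients_missing := by
  intro recipe pantry _
  unfold Spec_ingredients_missing
  exact ingredients_missing_eq_alt recipe pantry
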